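-- pv_equiv track=rewrite | github.com/ebaadazam/GeeksForGeeks-Array-Questions | Q17_First_repeating_element.py | first_repeating
-- ===== SOURCE A (Python) =====
-- def first_repeating(arr):
--     min_index = float('inf') # float('inf') is a way to represent positive infinity in Python. It is larger than any
--     # other number, so it is often used as an initial value when searching for a minimum value. In the code above,
--     # min_index is initialized to float('inf') so that any index found later in the code will be smaller than this
--     # initial value and will update the value of min_index.
--     dict = {}
--     for i in range(len(arr)):
--         if arr[i] in dict.keys():
--             min_index = min(min_index, dict[arr[i]])
--         else:
--             dict[arr[i]] = i
--     if min_index == float('inf'):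
--         return -1
--     else:
--         return min_index + 1
-- ===== SOURCE B (Python) =====
-- def first_repeating(arr):
--     counts = {}
--     for x in arr:
--         counts[x] = counts.get(x, 0) + 1
--     for i, x in enumerate(arr):
--         if counts[x] > 1:
--             return i + 1
--     return -1
-- ===== Notes on version B (the rewrite author's own statement) =====
-- stated objective: alternative
-- what changed: Replaces A's single interleaved pass (first-occurrence dict plus a running minimum of stored indices, with a float-infinity sentinel) by two plain passes: build a frequency table, then return i+1 at the first index whose element has count > 1.
import Mathlib
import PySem

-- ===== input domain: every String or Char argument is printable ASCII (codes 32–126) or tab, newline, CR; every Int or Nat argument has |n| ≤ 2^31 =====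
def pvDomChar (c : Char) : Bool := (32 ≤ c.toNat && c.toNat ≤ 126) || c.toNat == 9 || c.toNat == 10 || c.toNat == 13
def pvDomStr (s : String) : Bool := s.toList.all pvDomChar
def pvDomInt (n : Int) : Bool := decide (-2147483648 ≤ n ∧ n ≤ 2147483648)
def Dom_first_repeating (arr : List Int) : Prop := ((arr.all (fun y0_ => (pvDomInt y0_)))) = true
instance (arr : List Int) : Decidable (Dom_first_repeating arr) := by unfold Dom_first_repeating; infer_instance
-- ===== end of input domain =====

-- B replaces A's single interleaved pass (first-occurrence dict + running minimum with an
-- infinity sentinel) by two plain passes: count all elements, then return i+1 at the first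
-- index whose element has count > 1.


-- ===== PORT A =====
-- loop 'for i in range(len(arr))': structural recursion over arr carrying the index i;
-- min_index = float('inf') is modelled as 'none' (min(inf, j) = j).
def firstRepLoop (d : PySem.Dict Int Int) (minIndex : Option Int) (i : Int) :
    List Int → Option Int
  | [] => minIndex
  | x :: rest =>
    match d.get? x with
    | some j =>
        firstRepLoop d (some (match minIndex with | none => j | some m => min m j)) (i + 1) rest
    | none => firstRepLoop (d.insert x i) minIndex (i + 1) rest

def first_repeating (arr : List Int) : Int :=
  match firstRepLoop PySem.Dict.empty none 0 arr with
  | none => -1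
  | some m => m + 1

-- ===== PORT B =====
-- first pass: counts[x] = counts.get(x, 0) + 1
def buildCounts : List Int → PySem.Dict Int Int → PySem.Dict Int Int
  | [], counts => counts
  | x :: rest, counts => buildCounts rest (counts.insert x (counts.getD x 0 + 1))

-- second pass: counts[x] — getD is exact here: every scanned key was inserted in pass one
def scanCounts (counts : PySem.Dict Int Int) (i : Int) : List Int → Int
  | [] => -1
  | x :: rest => if counts.getD x 0 > 1 then i + 1 else scanCounts counts (i + 1) rest

def first_repeating_alt (arr : List Int) : Int :=
  scanCounts (buildCounts arr PySem.Dict.empty) 0 arr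

-- ===== PRECONDITION & SPEC =====
def Spec_first_repeating (arr : List Int) (out : Int) : Prop := out = first_repeating_alt arr
instance (arr : List Int) (out : Int) : Decidable (Spec_first_repeating arr out) := by unfold Spec_first_repeating; infer_instance

-- ===== CLAIM (what is proved, stated in full; the proofs are below) =====
def Claim_equal_first_repeating : Prop := ∀ (arr : List Int), Dom_first_repeating arr → Spec_first_repeating arr (first_repeating arr)

-- ===== LEMMAS AND PROOFS =====

-- first index of x in a list (proof-side)
def fidx : List Int → Int → Option Nat
  | [], _ => none
  | y :: r, x => if y = x then some 0 else (fidx r x).map (· + 1)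

-- first index whose element re-occurs later (proof-side common characterisation)
def FD : List Int → Option Nat
  | [] => none
  | x :: r => if x ∈ r then some 0 else (FD r).map (· + 1)

lemma fidx_eq_none_iff (p : List Int) (x : Int) : fidx p x = none ↔ x ∉ p := by
  induction p with
  | nil => simp [fidx]
  | cons y q ih =>
    by_cases h : y = x
    · simp [fidx, h]
    · simp [fidx, h, ih]
      exact fun _ hxy => h hxy.symm

lemma fidx_append (p l : List Int) (x : Int) :
    fidx (p ++ l) x = ((fidx p x).or ((fidx l x).map (· + p.length))) := by
  induction p with
  | nil => simp [fidx]
  | cons y q ih =>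
    by_cases h : y = x
    · simp [fidx, h]
    · cases hq : fidx q x <;> cases hl : fidx l x <;>
        simp [fidx, h, ih, hq, hl, Option.or] <;> omega

lemma FD_append_not_mem (p : List Int) (x : Int) (hx : x ∉ p) :
    FD (p ++ [x]) = FD p := by
  induction p with
  | nil => simp [FD]
  | cons y q ih =>
    have hyx : y ≠ x := by rintro rfl; exact hx (List.mem_cons_self ..)
    have hxq : x ∉ q := fun h => hx (List.mem_cons_of_mem _ h)
    by_cases hy : y ∈ q
    · simp [FD, hy]
    · have : y ∉ q ++ [x] := by simp [hy, hyx]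
      simp [FD, hy, this, ih hxq]

lemma FD_append_of_fidx (p : List Int) (x : Int) (j0 : Nat) (h : fidx p x = some j0) :
    FD (p ++ [x]) = some ((FD p).elim j0 (fun m => min m j0)) := by
  induction p generalizing j0 with
  | nil => simp [fidx] at h
  | cons y q ih =>
    by_cases hyx : y = x
    · subst hyx
      simp [fidx] at h
      subst h
      cases hq : FD (y :: q) <;> simp [FD, hq]
    · simp [fidx, hyx] at h
      obtain ⟨j0', hj0', rfl⟩ := h
      by_cases hy : y ∈ q
      · simp [FD, hy]
      · have hynot : y ∉ q ++ [x] := by simp [hy, hyx]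
        have := ih j0' hj0'
        cases hq : FD q <;>
          (simp [FD, hy, hynot, this, hq]; try omega)

lemma loopA (l : List Int) : ∀ (p : List Int) (d : PySem.Dict Int Int) (i : Int),
    i = (p.length : Int) →
    (∀ x, d.get? x = (fidx p x).map (fun k => (k : Int))) →
    firstRepLoop d ((FD p).map (fun k => (k : Int))) i l
      = (FD (p ++ l)).map (fun k => (k : Int)) := by
  induction l with
  | nil => intro p d i _ _; simp [firstRepLoop]
  | cons x rest ih =>
    intro p d i hi hd
    rw [show p ++ x :: rest = (p ++ [x]) ++ rest by simp]
    have hi' : i + 1 = ((p ++ [x]).length : Int) := by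
      simp only [List.length_append, List.length_cons, List.length_nil]
      push_cast
      omega
    cases hfx : fidx p x with
    | some j0 =>
      have hget : d.get? x = some (j0 : Int) := by rw [hd x, hfx]; rfl
      have hd' : ∀ y, d.get? y = (fidx (p ++ [x]) y).map (fun k => (k : Int)) := by
        intro y
        rw [hd y, fidx_append]
        cases hfy : fidx p y with
        | some k => simp [Option.or]
        | none =>
          have hyx : ¬ x = y := by
            rintro rfl; rw [hfy] at hfx; cases hfx
          simp [fidx, hyx, Option.or]
      cases hFD : FD p with
      | none =>
        have hnew : (some ((j0 : Nat) : Int)) = (FD (p ++ [x])).map (fun k => (k : Int)) := by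
          rw [FD_append_of_fidx p x j0 hfx, hFD]
          simp
        have hrec := ih (p ++ [x]) d (i + 1) hi' hd'
        rw [← hnew] at hrec
        simpa [firstRepLoop, hget] using hrec
      | some m0 =>
        have hnew : (some (min (m0 : Int) (j0 : Int)))
            = (FD (p ++ [x])).map (fun k => (k : Int)) := by
          rw [FD_append_of_fidx p x j0 hfx, hFD]
          simp
        have hrec := ih (p ++ [x]) d (i + 1) hi' hd'
        rw [← hnew] at hrec
        simpa [firstRepLoop, hget] using hrec
    | none =>
      have hget : d.get? x = (none : Option Int) := by rw [hd x, hfx]; rfl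
      have hxp : x ∉ p := (fidx_eq_none_iff p x).mp hfx
      have hd' : ∀ y, (d.insert x i).get? y = (fidx (p ++ [x]) y).map (fun k => (k : Int)) := by
        intro y
        rw [PySem.Dict.get?_insert, fidx_append]
        by_cases hyx : y = x
        · subst hyx
          simp [hfx, fidx, Option.or, hi]
        · have hxy : ¬ x = y := fun h => hyx h.symm
          rw [if_neg hyx, hd y]
          cases hfy : fidx p y <;> simp [fidx, hxy, Option.or]
      simp only [firstRepLoop, hget]
      rw [show FD p = FD (p ++ [x]) from (FD_append_not_mem p x hxp).symm]
      exact ih (p ++ [x]) (d.insert x i) (i + 1) hi' hd'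

lemma buildCounts_getD (l : List Int) : ∀ (d : PySem.Dict Int Int) (x : Int),
    (buildCounts l d).getD x 0 = d.getD x 0 + (l.count x : Int) := by
  induction l with
  | nil => intro d x; simp [buildCounts]
  | cons y rest ih =>
    intro d x
    rw [show buildCounts (y :: rest) d = buildCounts rest (d.insert y (d.getD y 0 + 1)) from rfl,
        ih]
    rw [PySem.Dict.getD_insert]
    by_cases h : x = y <;> simp [h, List.count_cons] <;> push_cast <;> omega

lemma scan_spec (arr : List Int) (counts : PySem.Dict Int Int)
    (hcnt : ∀ y, counts.getD y 0 = (arr.count y : Int)) :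
    ∀ (l p : List Int) (i : Int), arr = p ++ l → i = (p.length : Int) →
    (∀ y ∈ p, arr.count y ≤ 1) →
    scanCounts counts i l = (FD l).elim (-1) (fun j => i + (j : Int) + 1) := by
  intro l
  induction l with
  | nil => intro p i _ _ _; simp [scanCounts, FD]
  | cons x rest ih =>
    intro p i harr hi hp
    have hc : counts.getD x 0 = (arr.count x : Int) := hcnt x
    have hsplit : arr.count x = p.count x + (x :: rest).count x := by
      rw [harr, List.count_append]
    by_cases hbig : (1 : Int) < counts.getD x 0
    · -- count arr x ≥ 2, hence x ∈ rest (it cannot be in p)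
      have h2 : 2 ≤ arr.count x := by omega
      have hxp : x ∉ p := by
        intro hmem
        have := hp x hmem
        omega
      have hpc : p.count x = 0 := List.count_eq_zero.mpr hxp
      have hxrest : x ∈ rest := by
        have : 1 ≤ rest.count x := by
          simp [hpc, List.count_cons] at hsplit
          omega
        exact List.count_pos_iff.mp this
      simp [scanCounts, hbig, FD, hxrest]
    · -- count arr x ≤ 1, hence x ∉ rest
      have h1 : arr.count x ≤ 1 := by omega
      have hxrest : x ∉ rest := by
        intro hmem
        have : 1 ≤ rest.count x := List.count_pos_iff.mpr hmem
        simp [List.count_cons] at hsplit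
        omega
      rw [show scanCounts counts i (x :: rest) = scanCounts counts (i + 1) rest by
            simp [scanCounts, hbig]]
      rw [ih (p ++ [x]) (i + 1) (by simp [harr])
            (by simp only [List.length_append, List.length_cons, List.length_nil]
                push_cast
                omega)
            (by intro y hy
                rcases List.mem_append.mp hy with h | h
                · exact hp y h
                · simp at h; subst h; exact h1)]
      simp [FD, hxrest]
      cases hFD : FD rest with
      | none => simp
      | some j => simp; push_cast; ring

-- ===== VERDICT (by name: the statement is the Claim_ definition above) =====
theorem first_repeating_spec : Claim_equal_first_repeating := by
  unfold Claim_equal_first_repeating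
  intro arr _
  unfold Spec_first_repeating
  have hA : firstRepLoop PySem.Dict.empty none 0 arr
      = (FD arr).map (fun k => (k : Int)) := by
    simpa [FD] using loopA arr [] PySem.Dict.empty 0 (by simp)
      (by intro x; simp [fidx])
  have hB : first_repeating_alt arr
      = (FD arr).elim (-1) (fun j => 0 + (j : Int) + 1) := by
    unfold first_repeating_alt
    exact scan_spec arr _ (by intro y; simp [buildCounts_getD]) arr [] 0 rfl rfl
      (by intro y h; simp at h)
  unfold first_repeating
  rw [hA, hB]
  cases FD arr <;> simp
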